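-- pv_equiv track=rewrite | github.com/CompLin/nheengatu | src/Nheengatagger.py | splitPunctuation
-- ===== SOURCE A (Python) =====
-- PUNCTUATION='''.,;':?!“”"…()][}{'''
--
-- def splitPunctuation(token,punctuation=PUNCTUATION):
--     tokenlist=[]
--     c= len(token)
--     if c == 1:
--         tokenlist.append(token)
--     elif c == 2:
--         tokenlist.append(token[:-1])
--         tokenlist.append(token[-1])
--     elif c > 2:
--         tokenlist.append(token[-1])
--         i=-2
--         while(i >= -len(token)):
--             char=token[i]
--             if char in punctuation:
--                 tokenlist.append(char)
--             else:
--                 t=token[:i+1]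
--                 if t.startswith('"'):
--                     tokenlist.append(t[1:])
--                     tokenlist.append(t[0])
--                 else:
--                     tokenlist.append(token[:i+1])
--                 break
--             i=i-1
--         tokenlist.reverse()
--     return tokenlist
-- ===== SOURCE B (Python) =====
-- PUNCTUATION='''.,;':?!“”"…()][}{'''
--
-- def splitPunctuation(token, punctuation=PUNCTUATION):
--     if not token:
--         return []
--     if len(token) <= 2:
--         return list(token)
--     # forward pass: cut = index just after the last non-punctuation char of token[:-1]
--     cut = 0
--     for i, ch in enumerate(token[:-1]):
--         if ch not in punctuation:
--             cut = i + 1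
--     head = token[:cut]
--     parts = ['"', head[1:]] if head.startswith('"') else ([head] if head else [])
--     return parts + list(token[cut:-1]) + [token[-1]]
-- ===== Notes on version B (the rewrite author's own statement) =====
-- stated objective: simpler
-- what changed: Replaces A's backward while-loop with negative indices that emits tokens in reversed order and reverses at the end by a single forward enumerate pass that records the cut point after the last non-punctuation char of token[:-1], then assembles the result directly by slicing (head with quote split, punctuation chars, last char); bulk slicing/list() replaces per-char negative indexing.
import Mathlib
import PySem

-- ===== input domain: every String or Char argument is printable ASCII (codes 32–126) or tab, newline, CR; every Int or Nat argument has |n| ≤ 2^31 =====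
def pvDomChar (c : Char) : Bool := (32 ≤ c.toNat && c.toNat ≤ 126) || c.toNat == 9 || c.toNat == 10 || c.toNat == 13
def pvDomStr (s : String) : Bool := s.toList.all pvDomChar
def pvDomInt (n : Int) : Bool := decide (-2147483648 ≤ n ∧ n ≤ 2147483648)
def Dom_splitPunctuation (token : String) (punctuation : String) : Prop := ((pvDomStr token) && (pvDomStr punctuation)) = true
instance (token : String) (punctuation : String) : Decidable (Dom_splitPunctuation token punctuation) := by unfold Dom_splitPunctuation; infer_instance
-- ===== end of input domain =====

-- B replaces A's backward while-loop (negative indices, reversed build, final reverse())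
-- by a single FORWARD pass that records the cut point after the last non-punctuation
-- char of token[:-1], then assembles the result by slicing; objective: simpler.

-- ===== PORT A =====
-- A's while-loop over i = -2, -3, …: position p = len(token)+i, scanned downward.
def pvALoop (cs pcs : List Char) : Nat → List String → List String
  | p, acc =>
    let char := cs.getD p ' '
    if pcs.contains char then
      let acc' := acc ++ [String.ofList [char]]
      match p with
      | 0 => acc'
      | q+1 => pvALoop cs pcs q acc'
    else
      let t := cs.take (p+1)
      if t.take 1 = ['"'] then acc ++ [String.ofList (t.drop 1), String.ofList (t.take 1)]
      else acc ++ [String.ofList t]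

def splitPunctuation (token : String) (punctuation : String) : List String :=
  let cs := token.toList
  let pcs := punctuation.toList
  let c := cs.length
  if c = 1 then [token]
  else if c = 2 then [String.ofList (cs.take 1), String.ofList (cs.drop 1)]
  else if c > 2 then (pvALoop cs pcs (c - 2) [String.ofList (cs.drop (c - 1))]).reverse
  else []

-- ===== PORT B =====
-- Source B's forward pass: 'for i, ch in enumerate(token[:-1]): if ch not in punctuation: cut = i + 1'.
def pvCut (rest pcs : List Char) : Nat :=
  rest.zipIdx.foldl (fun acc p => if pcs.contains p.1 then acc else p.2 + 1) 0

def splitPunctuation_alt (token : String) (punctuation : String) : List String :=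
  let cs := token.toList
  let pcs := punctuation.toList
  let n := cs.length
  if n = 0 then []
  else if n ≤ 2 then cs.map (fun ch => String.ofList [ch])
  else
    let rest := cs.take (n - 1)
    let cut := pvCut rest pcs
    let head := cs.take cut
    let parts : List String :=
      if head.take 1 = ['"'] then [String.ofList ['"'], String.ofList (head.drop 1)]
      else if head ≠ [] then [String.ofList head] else []
    parts ++ (rest.drop cut).map (fun ch => String.ofList [ch]) ++ [String.ofList (cs.drop (n - 1))]

-- ===== PRECONDITION & SPEC =====
def Spec_splitPunctuation (token : String) (punctuation : String) (out : List String) : Prop := out = splitPunctuation_alt token punctuation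
instance (token : String) (punctuation : String) (out : List String) : Decidable (Spec_splitPunctuation token punctuation out) := by unfold Spec_splitPunctuation; infer_instance

-- ===== CLAIM =====
def Claim_equal_splitPunctuation : Prop := ∀ (token : String) (punctuation : String), Dom_splitPunctuation token punctuation → Spec_splitPunctuation token punctuation (splitPunctuation token punctuation)

-- ===== LEMMAS AND PROOFS =====

-- Backward trimmer used to characterise A's loop (proof-only helper).
def pvBTrim (rest pcs : List Char) : Nat → Nat
  | 0 => 0
  | k+1 => if pcs.contains (rest.getD k ' ') then pvBTrim rest pcs k else k+1

-- The material A's loop produces from positions 0..p, in forward order.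
def pvBPart (cs pcs : List Char) (p : Nat) : List String :=
  let r := cs.take (p+1)
  let k := pvBTrim r pcs (p+1)
  let head := r.take k
  let trail := r.drop k
  (if head ≠ [] then
     if head.take 1 = ['"'] then [String.ofList ['"'], String.ofList (head.drop 1)]
     else [String.ofList head]
   else []) ++ trail.map (fun c => String.ofList [c])

theorem pvBTrim_le (rest pcs : List Char) (j : Nat) : pvBTrim rest pcs j ≤ j := by
  induction j with
  | zero => simp [pvBTrim]
  | succ k ih => simp only [pvBTrim]; split <;> omega

theorem pvBTrim_congr (r1 r2 pcs : List Char) (j : Nat)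
    (h : ∀ i, i < j → r1.getD i ' ' = r2.getD i ' ') :
    pvBTrim r1 pcs j = pvBTrim r2 pcs j := by
  induction j with
  | zero => rfl
  | succ k ih =>
    simp only [pvBTrim, h k (Nat.lt_succ_self k)]
    split
    · exact ih (fun i hi => h i (Nat.lt_succ_of_lt hi))
    · rfl

theorem pvBTrim_take (cs pcs : List Char) (m j : Nat) (hj : j ≤ m) :
    pvBTrim (cs.take m) pcs j = pvBTrim cs pcs j := by
  refine pvBTrim_congr _ _ _ _ (fun i hi => ?_)
  simp [List.getD_eq_getElem?_getD, List.getElem?_take_of_lt (by omega : i < m)]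

-- B's forward cut equals the backward trim of the whole list.
theorem pvCut_eq (rest pcs : List Char) : pvCut rest pcs = pvBTrim rest pcs rest.length := by
  induction rest using List.reverseRecOn with
  | nil => rfl
  | append_singleton init a ih =>
    have hfwd : pvCut (init ++ [a]) pcs
        = if pcs.contains a then pvCut init pcs else init.length + 1 := by
      simp [pvCut, List.zipIdx_append, List.foldl_append]
    have hget : (init ++ [a]).getD init.length ' ' = a := by
      simp [List.getD_eq_getElem?_getD]
    have hshift : pvBTrim (init ++ [a]) pcs init.length = pvBTrim init pcs init.length := by
      refine pvBTrim_congr _ _ _ _ (fun i hi => ?_)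
      simp [List.getD_eq_getElem?_getD, List.getElem?_append_left hi]
    rw [hfwd]
    simp only [List.length_append, List.length_singleton, pvBTrim, hget, hshift, ih]

theorem pvALoop_eq (cs pcs : List Char) (p : Nat) (hp : p < cs.length) (acc : List String) :
    pvALoop cs pcs p acc = acc ++ (pvBPart cs pcs p).reverse := by
  induction p generalizing acc with
  | zero =>
    have h1 : cs.take 1 = [cs.getD 0 ' '] := by
      cases cs with
      | nil => simp at hp
      | cons a l => simp [List.getD]
    rw [pvALoop]
    simp only [pvBPart, Nat.zero_add, pvBTrim, h1, List.getD_cons_zero]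
    by_cases hin : pcs.contains (cs.getD 0 ' ') = true
    · simp only [if_pos hin]
      simp
    · simp only [if_neg hin]
      split <;> simp_all
  | succ q ih =>
    rw [pvALoop]
    have hgq : (cs.take (q+1+1)).getD (q+1) ' ' = cs.getD (q+1) ' ' := by
      simp [List.getD_eq_getElem?_getD, List.getElem?_take_of_lt (by omega : q+1 < q+1+1)]
    by_cases hin : pcs.contains (cs.getD (q+1) ' ') = true
    · simp only [if_pos hin]
      rw [ih (by omega)]
      have hk : pvBTrim (cs.take (q+1+1)) pcs (q+1+1) = pvBTrim (cs.take (q+1)) pcs (q+1) := by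
        rw [pvBTrim_take cs pcs (q+1+1) (q+1+1) le_rfl, pvBTrim_take cs pcs (q+1) (q+1) le_rfl]
        simp only [pvBTrim]
        rw [if_pos hin]
      have hlen1 : (cs.take (q+1)).length = q+1 := by
        rw [List.length_take]; omega
      have hkle : pvBTrim (cs.take (q+1)) pcs (q+1) ≤ (cs.take (q+1)).length := by
        rw [hlen1]; exact pvBTrim_le _ _ _
      have htake2 : cs.take (q+1+1) = cs.take (q+1) ++ [cs.getD (q+1) ' '] := by
        have hg : cs.getD (q+1) ' ' = cs[q+1] := by
          simp [List.getD_eq_getElem?_getD, List.getElem?_eq_getElem hp]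
        rw [hg]
        exact List.take_succ_eq_append_getElem hp
      have hpart : pvBPart cs pcs (q+1) = pvBPart cs pcs q ++ [String.ofList [cs.getD (q+1) ' ']] := by
        simp only [pvBPart]
        rw [hk, htake2]
        rw [List.take_append_of_le_length hkle, List.drop_append_of_le_length hkle]
        simp
      rw [hpart]
      simp
    · simp only [if_neg hin]
      have hk : pvBTrim (cs.take (q+1+1)) pcs (q+1+1) = q+1+1 := by
        simp only [pvBTrim, hgq]
        rw [if_neg hin]
      have hlen : (cs.take (q+1+1)).length = q+1+1 := by
        rw [List.length_take]; omega
      have hfull : (cs.take (q+1+1)).take (pvBTrim (cs.take (q+1+1)) pcs (q+1+1)) = cs.take (q+1+1) := by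
        rw [hk]; exact List.take_of_length_le (by omega)
      have hdrop : (cs.take (q+1+1)).drop (pvBTrim (cs.take (q+1+1)) pcs (q+1+1)) = [] := by
        rw [hk]; exact List.drop_of_length_le (by omega)
      have hne : cs.take (q+1+1) ≠ [] := by
        intro h; rw [h] at hlen; simp at hlen
      simp only [pvBPart, hfull, hdrop, if_pos hne, List.map_nil, List.append_nil]
      split <;> simp_all

theorem splitPunctuation_spec : Claim_equal_splitPunctuation := by
  intro token punctuation _
  unfold Spec_splitPunctuation splitPunctuation splitPunctuation_alt
  set cs := token.toList with hcs
  set pcs := punctuation.toList with hpcs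
  by_cases h1 : cs.length = 1
  · obtain ⟨a, ha⟩ : ∃ a, cs = [a] := List.length_eq_one_iff.mp h1
    have htok : token = String.ofList [a] := by rw [← ha, hcs]; simp
    simp [ha, htok]
  · by_cases h2 : cs.length = 2
    · obtain ⟨a, b, hab⟩ : ∃ a b, cs = [a, b] := List.length_eq_two.mp h2
      simp [hab]
    · by_cases h3 : cs.length > 2
      · have h0 : ¬ cs.length = 0 := by omega
        have hle : ¬ cs.length ≤ 2 := by omega
        simp only [h1, h2, h3, h0, hle, ite_true, ite_false]
        have hp : cs.length - 2 < cs.length := by omega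
        rw [pvALoop_eq cs pcs (cs.length - 2) hp]
        rw [List.reverse_append]
        simp only [List.reverse_reverse, List.reverse_singleton]
        have e2 : (cs.take (cs.length - 1)).length = cs.length - 1 := by
          rw [List.length_take]; omega
        have e1 : cs.length - 2 + 1 = cs.length - 1 := by omega
        have hcut : pvCut (cs.take (cs.length - 1)) pcs
            = pvBTrim (cs.take (cs.length - 1)) pcs (cs.length - 1) := by
          rw [pvCut_eq, e2]
        have hkle : pvBTrim (cs.take (cs.length - 1)) pcs (cs.length - 1) ≤ cs.length - 1 :=
          pvBTrim_le _ _ _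
        have htt : cs.take (pvBTrim (cs.take (cs.length - 1)) pcs (cs.length - 1))
            = (cs.take (cs.length - 1)).take (pvBTrim (cs.take (cs.length - 1)) pcs (cs.length - 1)) := by
          rw [List.take_take]
          congr 1
          omega
        simp only [pvBPart, e1, hcut, htt]
        -- align the two if-shapes for the head parts
        set head := (cs.take (cs.length - 1)).take (pvBTrim (cs.take (cs.length - 1)) pcs (cs.length - 1)) with hh
        by_cases hq : head.take 1 = ['"']
        · have hne : head ≠ [] := by
            intro h; rw [h] at hq; simp at hq
          simp [hq, hne]
        · by_cases hne : head = [] <;> simp [hq, hne]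
      · have h0 : cs.length = 0 := by omega
        simp [h0]
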